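-- pv_equiv track=rewrite | github.com/mdomina/ForgeNPU | create_npu/candidate_space.py | build_candidate_ids
-- ===== SOURCE A (Python) =====
-- from typing import List
--
-- DEFAULT_CANDIDATE_PROFILES = ["balanced", "throughput_max", "efficiency"]
--
-- def build_candidate_ids(max_candidates: int) -> List[str]:
--     resolved_count = max(1, max_candidates)
--     candidate_ids: List[str] = []
--     for index in range(resolved_count):
--         profile = DEFAULT_CANDIDATE_PROFILES[index % len(DEFAULT_CANDIDATE_PROFILES)]
--         variant_index = index // len(DEFAULT_CANDIDATE_PROFILES)
--         if variant_index == 0: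
--             candidate_ids.append(profile)
--         else:
--             candidate_ids.append(f"{profile}_b{variant_index}")
--     return candidate_ids
-- ===== SOURCE B (Python) =====
-- from typing import List
--
-- DEFAULT_CANDIDATE_PROFILES = ["balanced", "throughput_max", "efficiency"]
--
-- def build_candidate_ids(max_candidates: int) -> List[str]:
--     resolved_count = max(1, max_candidates)
--     candidate_ids = [None] * resolved_count
--     position = 0
--     variant_index = 0
--     while position < resolved_count:
--         suffix = "" if variant_index == 0 else f"_b{variant_index}"
--         for profile in DEFAULT_CANDIDATE_PROFILES:
--             if position >= resolved_count:
--                 break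
--             candidate_ids[position] = profile + suffix
--             position += 1
--         variant_index += 1
--     return candidate_ids
-- ===== Notes on version B (the rewrite author's own statement) =====
-- stated objective: alternative
-- what changed: Replaces the flat index loop that reconstructs profile and variant via % and // with a preallocated result list filled in place by two nested loops (variant rounds over the profile list), the round suffix computed once per round.
import Mathlib
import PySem

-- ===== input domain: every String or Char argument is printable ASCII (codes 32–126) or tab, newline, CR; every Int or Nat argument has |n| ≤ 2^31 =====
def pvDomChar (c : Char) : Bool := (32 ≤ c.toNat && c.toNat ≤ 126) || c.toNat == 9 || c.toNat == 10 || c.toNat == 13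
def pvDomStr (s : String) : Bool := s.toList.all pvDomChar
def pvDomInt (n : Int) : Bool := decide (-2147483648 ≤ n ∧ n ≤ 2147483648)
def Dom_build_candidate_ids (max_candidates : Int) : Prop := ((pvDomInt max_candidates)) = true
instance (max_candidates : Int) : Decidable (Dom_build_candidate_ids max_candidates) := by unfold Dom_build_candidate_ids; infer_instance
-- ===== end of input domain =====

-- B preallocates the result list and fills it in place with nested loops (variant rounds
-- over the profile list, the suffix computed once per round) instead of A's flat loop
-- decoding profile and variant from the index by % and //; return values agree everywhere.

-- ===== PORT A =====
def DEFAULT_CANDIDATE_PROFILES : List String := ["balanced", "throughput_max", "efficiency"]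

-- literal port of A's flat loop; pyGetD "" is pyGet? with a default: the index
-- 'index % 3' is always in range 0..2, so the default is never used.
def build_candidate_ids (max_candidates : Int) : List String :=
  let resolved_count : Int := max 1 max_candidates
  (PySem.List.pyRange 0 resolved_count 1).foldl (fun candidate_ids index =>
    let profile := PySem.List.pyGetD DEFAULT_CANDIDATE_PROFILES
      (PySem.Int.mod index (DEFAULT_CANDIDATE_PROFILES.length : Int)) ""
    let variant_index := PySem.Int.floordiv index (DEFAULT_CANDIDATE_PROFILES.length : Int)
    if variant_index = 0 then candidate_ids ++ [profile]
    else candidate_ids ++ [profile ++ "_b" ++ PySem.Int.toStr variant_index]) []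

-- ===== PORT B =====
-- the per-round suffix: "" for the first round, "_b{v}" afterwards
def pySuffix (variant_index : Nat) : String :=
  if variant_index = 0 then "" else "_b" ++ PySem.Int.toStr (variant_index : Int)

-- inner 'for profile in ...' loop with its break: writes profile+suffix at
-- 'position' via List.set (Python's candidate_ids[position] = ...)
def innerFill : List String → String → List String → Nat → List String × Nat
  | [], _, candidate_ids, position => (candidate_ids, position)
  | profile :: ps, suffix, candidate_ids, position =>
      if position ≥ candidate_ids.length then (candidate_ids, position)
      else innerFill ps suffix (candidate_ids.set position (profile ++ suffix)) (position + 1)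

theorem innerFill_length (ps : List String) (s : String) (out : List String) (pos : Nat) :
    (innerFill ps s out pos).1.length = out.length := by
  induction ps generalizing out pos with
  | nil => simp [innerFill]
  | cons p ps ih =>
    by_cases h : pos ≥ out.length
    · simp [innerFill, h]
    · simp [innerFill, h, ih]

theorem innerFill_pos_le (ps : List String) (s : String) (out : List String) (pos : Nat) :
    pos ≤ (innerFill ps s out pos).2 := by
  induction ps generalizing out pos with
  | nil => simp [innerFill]
  | cons p ps ih =>
    by_cases h : pos ≥ out.length
    · simp [innerFill, h]
    · simp only [innerFill, if_neg (by omega)]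
      exact le_trans (by omega) (ih _ (pos + 1))

-- outer 'while position < resolved_count' loop over variant rounds,
-- the suffix computed once per round
def outerFill (candidate_ids : List String) (position variant_index : Nat) : List String :=
  if hlt : position < candidate_ids.length then
    let res := innerFill DEFAULT_CANDIDATE_PROFILES (pySuffix variant_index) candidate_ids position
    outerFill res.1 res.2 (variant_index + 1)
  else candidate_ids
termination_by candidate_ids.length - position
decreasing_by
  have hlen := innerFill_length DEFAULT_CANDIDATE_PROFILES (pySuffix variant_index)
    candidate_ids position
  have hpos : position + 1 ≤ (innerFill DEFAULT_CANDIDATE_PROFILES (pySuffix variant_index)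
      candidate_ids position).2 := by
    rw [show DEFAULT_CANDIDATE_PROFILES = "balanced" :: ["throughput_max", "efficiency"] from rfl,
      innerFill, if_neg (by omega)]
    exact innerFill_pos_le _ _ _ _
  omega

-- '[None] * resolved_count' preallocation: the placeholder is "", every slot is overwritten
def build_candidate_ids_alt (max_candidates : Int) : List String :=
  outerFill (List.replicate (max 1 max_candidates).toNat "") 0 0

-- ===== PRECONDITION & SPEC =====
def Spec_build_candidate_ids (max_candidates : Int) (out : List String) : Prop := out = build_candidate_ids_alt max_candidates
instance (max_candidates : Int) (out : List String) : Decidable (Spec_build_candidate_ids max_candidates out) := by unfold Spec_build_candidate_ids; infer_instance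

-- ===== CLAIM (what is proved, stated in full; the proofs are below) =====
def Claim_equal_build_candidate_ids : Prop := ∀ (max_candidates : Int), Dom_build_candidate_ids max_candidates → Spec_build_candidate_ids max_candidates (build_candidate_ids max_candidates)

-- ===== LEMMAS AND PROOFS =====

-- common normal form: the id at flat position k
def idAt (k : Nat) : String :=
  let p := DEFAULT_CANDIDATE_PROFILES.getD (k % 3) ""
  if k / 3 = 0 then p else p ++ "_b" ++ PySem.Int.toStr ((k / 3 : Nat) : Int)

-- the body of A's loop, as a function of the index alone
def fA (index : Int) : String :=
  let profile := PySem.List.pyGetD DEFAULT_CANDIDATE_PROFILES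
    (PySem.Int.mod index (DEFAULT_CANDIDATE_PROFILES.length : Int)) ""
  let variant_index := PySem.Int.floordiv index (DEFAULT_CANDIDATE_PROFILES.length : Int)
  if variant_index = 0 then profile
  else profile ++ "_b" ++ PySem.Int.toStr variant_index

theorem fA_eq (k : Nat) : fA (0 + (k : Int)) = idAt k := by
  have h3 : ((DEFAULT_CANDIDATE_PROFILES.length : Nat) : Int) = ((3 : Nat) : Int) := by
    simp [DEFAULT_CANDIDATE_PROFILES]
  simp only [zero_add, fA, idAt, h3, PySem.Int.mod_natCast, PySem.Int.floordiv_natCast,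
    PySem.List.pyGetD_natCast, Nat.cast_eq_zero]

theorem build_candidate_ids_eq_map (m : Int) :
    build_candidate_ids m = (List.range (max 1 m).toNat).map idAt := by
  unfold build_candidate_ids
  have hfun : (fun (candidate_ids : List String) (index : Int) =>
      let profile := PySem.List.pyGetD DEFAULT_CANDIDATE_PROFILES
        (PySem.Int.mod index (DEFAULT_CANDIDATE_PROFILES.length : Int)) ""
      let variant_index := PySem.Int.floordiv index (DEFAULT_CANDIDATE_PROFILES.length : Int)
      if variant_index = 0 then candidate_ids ++ [profile]
      else candidate_ids ++ [profile ++ "_b" ++ PySem.Int.toStr variant_index])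
      = fun acc i => acc ++ [fA i] := by
    funext acc i
    simp only [fA]
    split <;> rfl
  rw [hfun, PySem.List.foldl_append_singleton_eq_map, PySem.List.pyRange_one]
  simp only [List.map_map, Int.sub_zero, List.nil_append]
  exact List.map_congr_left fun k _ => fA_eq k

-- the id the round for variant v writes at its j-th slot
def roundName (v j : Nat) : String :=
  DEFAULT_CANDIDATE_PROFILES.getD j "" ++ pySuffix v

theorem idAt_eq_roundName (k : Nat) : idAt k = roundName (k / 3) (k % 3) := by
  by_cases h : k / 3 = 0 <;> simp [idAt, roundName, pySuffix, h, String.append_assoc]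

theorem set_append_replicate (F : List String) (k : Nat) (a x : String) :
    (F ++ List.replicate (k + 1) x).set F.length a = (F ++ [a]) ++ List.replicate k x := by
  induction F with
  | nil => simp [List.replicate_succ]
  | cons f F ih => simpa using ih

theorem innerFill_spec (ps : List String) (s : String) (F : List String) (rem : Nat) :
    innerFill ps s (F ++ List.replicate rem "") F.length =
      ((F ++ (ps.take rem).map (· ++ s)) ++ List.replicate (rem - ps.length) "",
        F.length + min ps.length rem) := by
  induction ps generalizing F rem with
  | nil => simp [innerFill]
  | cons p ps ih =>
    cases rem with
    | zero => simp [innerFill]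
    | succ r =>
      rw [innerFill]
      rw [if_neg (by simp), set_append_replicate]
      have h1 : (F ++ [p ++ s]).length = F.length + 1 := by simp
      rw [← h1, ih (F ++ [p ++ s]) r]
      simp only [Prod.mk.injEq, List.take_succ_cons, List.map_cons, List.append_assoc,
        List.cons_append, List.nil_append, List.length_cons, Nat.succ_sub_succ, h1]
      exact ⟨trivial, by omega⟩

theorem outer_spec (rem : Nat) : ∀ (F : List String) (v : Nat),
    outerFill (F ++ List.replicate rem "") F.length v =
      F ++ (List.range rem).map (fun i => roundName (v + i / 3) (i % 3)) := by
  induction rem using Nat.strong_induction_on with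
  | _ rem ih =>
    intro F v
    rw [outerFill]
    cases rem with
    | zero => simp
    | succ r =>
      rw [dif_pos (by simp)]
      rw [innerFill_spec DEFAULT_CANDIDATE_PROFILES (pySuffix v) F (r + 1)]
      have hlen : (F ++ ((DEFAULT_CANDIDATE_PROFILES.take (r + 1)).map
          (· ++ pySuffix v))).length
          = F.length + min DEFAULT_CANDIDATE_PROFILES.length (r + 1) := by
        simp [DEFAULT_CANDIDATE_PROFILES]; omega
      rw [← hlen]
      rw [ih ((r + 1) - DEFAULT_CANDIDATE_PROFILES.length) (by simp [DEFAULT_CANDIDATE_PROFILES])]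
      -- both sides are F ++ (this round's names) ++ (the rest)
      match r, v with
      | 0, v => simp [DEFAULT_CANDIDATE_PROFILES, roundName, List.range_succ]
      | 1, v => simp [DEFAULT_CANDIDATE_PROFILES, roundName, List.range_succ]
      | n + 2, v =>
        have hr : List.range (n + 3) = List.range 3 ++ (List.range n).map (fun i => 3 + i) := by
          rw [show n + 3 = 3 + n by omega, List.range_add]
        rw [hr, List.map_append, List.map_map, ← List.append_assoc]
        congr 1
        · rw [List.take_of_length_le (by simp [DEFAULT_CANDIDATE_PROFILES])]
          simp [DEFAULT_CANDIDATE_PROFILES, roundName, List.range_succ]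
        · exact List.map_congr_left fun i _ => by
            simp only [Function.comp]
            congr 1 <;> omega

-- ===== VERDICT (by name: the statement is the Claim_ definition above) =====
theorem build_candidate_ids_spec : Claim_equal_build_candidate_ids := by
  intro m _
  unfold Spec_build_candidate_ids build_candidate_ids_alt
  rw [build_candidate_ids_eq_map,
    show List.replicate (max 1 m).toNat "" = [] ++ List.replicate (max 1 m).toNat "" from rfl,
    show 0 = ([] : List String).length from rfl, outer_spec]
  simp only [List.nil_append, List.length_nil, Nat.zero_add]
  exact List.map_congr_left fun k _ => idAt_eq_roundName k
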